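-- pv_equiv track=rewrite | github.com/LordMirex/prototype | app.py | get_smart_placeholder_default
-- ===== SOURCE A (Python) =====
-- def get_smart_placeholder_default(var_name):
--     """COMPREHENSIVE placeholder defaults for ALL variable name formats."""
--     name_lower = var_name.lower()
--
--     # Name variations - ALL POSSIBLE FORMATS
--     if any(x in name_lower for x in ['name', 'full_name', 'student_name', 'applicant_name', 'name_1']):
--         return "Joe Doe"
--
--
--     # Address variations - ALL POSSIBLE FORMATS
--     elif any(x in name_lower for x in ['address', 'sender_address', 'my_address', 'location', 'residence']):
--         return "24 Avenue Avenue, Osato Junction, Benin City, Edo State"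
--     elif 'street' in name_lower:
--         return "24 Avenue Avenue"
--     elif any(x in name_lower for x in ['city', 'town']):
--         return "Benin City"
--     elif 'state' in name_lower:
--         return "Edo State"
--
--     # Department/Faculty variations
--     elif any(x in name_lower for x in ['department', 'dept']):
--         return "Production Engineering"
--     elif any(x in name_lower for x in ['faculty']):
--         return "Engineering"
--     elif any(x in name_lower for x in ['college', 'institution', 'university', 'school']):
--         return "University of Benin"
--
--     # Academic info - ALL FORMATS
--     elif any(x in name_lower for x in ['mat_no', 'matric_no', 'reg_no', 'student_id', 'registration_number']):
--         return "ENG2204223"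
--
--
--     # Gender variations - ALL FORMATS
--     elif 'gender' in name_lower:
--         return "Male"
--     elif any(x in name_lower for x in ['his_her', 'his_she']):
--         return "his"
--     elif any(x in name_lower for x in ['him_her', 'him_she']):
--         return "him"
--     elif any(x in name_lower for x in ['he_she', 'heshe']):
--         return "he"
--
--
--     # Dates - NO PLACEHOLDER (auto-filled)
--     elif any(x in name_lower for x in ['date', 'time']):
--         return ""  # Will be auto-filled with current date
--
--     # Default for unrecognized
--     return f"Enter {var_name.replace('_', ' ').title()}"
-- ===== SOURCE B (Python) =====
-- _KEYWORDS = {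
--     'name': 0, 'full_name': 0, 'student_name': 0, 'applicant_name': 0, 'name_1': 0,
--     'address': 1, 'sender_address': 1, 'my_address': 1, 'location': 1, 'residence': 1,
--     'street': 2,
--     'city': 3, 'town': 3,
--     'state': 4,
--     'department': 5, 'dept': 5,
--     'faculty': 6,
--     'college': 7, 'institution': 7, 'university': 7, 'school': 7,
--     'mat_no': 8, 'matric_no': 8, 'reg_no': 8, 'student_id': 8, 'registration_number': 8,
--     'gender': 9,
--     'his_her': 10, 'his_she': 10,
--     'him_her': 11, 'him_she': 11,
--     'he_she': 12, 'heshe': 12,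
--     'date': 13, 'time': 13,
-- }
-- _DEFAULTS = [
--     "Joe Doe",
--     "24 Avenue Avenue, Osato Junction, Benin City, Edo State",
--     "24 Avenue Avenue",
--     "Benin City",
--     "Edo State",
--     "Production Engineering",
--     "Engineering",
--     "University of Benin",
--     "ENG2204223",
--     "Male",
--     "his",
--     "him",
--     "he",
--     "",
-- ]
-- _LENGTHS = sorted({len(k) for k in _KEYWORDS})
--
--
-- def get_smart_placeholder_default(var_name):
--     """Inverted matching: instead of searching the text for each keyword, enumerate
--     the slices of the lowered name and look them up in a hash map keyword->priority,
--     collecting the set of matched priorities; answer is the default of the smallest."""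
--     nl = var_name.lower()
--     found = set()
--     for i in range(len(nl)):
--         for L in _LENGTHS:
--             p = _KEYWORDS.get(nl[i:i + L])
--             if p is not None:
--                 found.add(p)
--     if found:
--         return _DEFAULTS[min(found)]
--     return f"Enter {var_name.replace('_', ' ').title()}"
-- ===== Notes on version B (the rewrite author's own statement) =====
-- stated objective: alternative
-- what changed: Inverts the search: instead of running a substring search over the lowered name once per keyword down an elif chain, B enumerates slices of the lowered name, looks each up in a hash map keyword->branch-priority, collects the set of matched priorities, and returns the default of the minimum priority; the fallback is unchanged.
import Mathlib
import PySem

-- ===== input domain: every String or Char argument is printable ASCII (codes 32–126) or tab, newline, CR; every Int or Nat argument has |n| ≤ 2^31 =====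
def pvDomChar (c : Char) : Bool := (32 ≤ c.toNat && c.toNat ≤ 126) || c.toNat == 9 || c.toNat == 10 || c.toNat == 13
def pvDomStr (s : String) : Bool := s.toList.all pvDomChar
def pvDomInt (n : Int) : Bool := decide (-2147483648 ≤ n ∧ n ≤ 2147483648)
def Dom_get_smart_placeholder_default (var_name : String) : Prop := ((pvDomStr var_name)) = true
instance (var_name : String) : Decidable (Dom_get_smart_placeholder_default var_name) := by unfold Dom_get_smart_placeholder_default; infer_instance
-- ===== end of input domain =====

-- B inverts the search: it enumerates slices of the lowered name, looks each up in a
-- keyword->priority map, and returns the default of the least matched priority.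

-- str.title(), hand-ported: uppercase a letter after a non-letter, lowercase otherwise.
-- Exact on the ASCII domain (where Python's "cased" characters are exactly the letters).
def pyTitleChars : List Char → Bool → List Char
  | [], _ => []
  | c :: rest, prevAlpha =>
    (if PySem.Chars.isalpha c then
        (if prevAlpha then PySem.Chars.lowerChar c else PySem.Chars.upperChar c)
      else c) :: pyTitleChars rest (PySem.Chars.isalpha c)

def pyTitle (s : String) : String := String.ofList (pyTitleChars s.toList false)

-- ===== PORT A =====
def get_smart_placeholder_default (var_name : String) : String :=
  let name_lower := PySem.Str.lower var_name
  if (["name", "full_name", "student_name", "applicant_name", "name_1"].any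
        (fun x => PySem.Str.isIn x name_lower)) then "Joe Doe"
  else if (["address", "sender_address", "my_address", "location", "residence"].any
        (fun x => PySem.Str.isIn x name_lower)) then
    "24 Avenue Avenue, Osato Junction, Benin City, Edo State"
  else if PySem.Str.isIn "street" name_lower then "24 Avenue Avenue"
  else if (["city", "town"].any (fun x => PySem.Str.isIn x name_lower)) then "Benin City"
  else if PySem.Str.isIn "state" name_lower then "Edo State"
  else if (["department", "dept"].any (fun x => PySem.Str.isIn x name_lower)) then
    "Production Engineering"
  else if (["faculty"].any (fun x => PySem.Str.isIn x name_lower)) then "Engineering"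
  else if (["college", "institution", "university", "school"].any
        (fun x => PySem.Str.isIn x name_lower)) then "University of Benin"
  else if (["mat_no", "matric_no", "reg_no", "student_id", "registration_number"].any
        (fun x => PySem.Str.isIn x name_lower)) then "ENG2204223"
  else if PySem.Str.isIn "gender" name_lower then "Male"
  else if (["his_her", "his_she"].any (fun x => PySem.Str.isIn x name_lower)) then "his"
  else if (["him_her", "him_she"].any (fun x => PySem.Str.isIn x name_lower)) then "him"
  else if (["he_she", "heshe"].any (fun x => PySem.Str.isIn x name_lower)) then "he"
  else if (["date", "time"].any (fun x => PySem.Str.isIn x name_lower)) then ""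
  else "Enter " ++ pyTitle (PySem.Str.replace var_name "_" " ")

-- ===== PORT B =====
-- the dict _KEYWORDS : keyword -> priority (branch number of A's chain)
def pvKw : List (List Char × Nat) :=
  [ ("name".toList, 0), ("full_name".toList, 0), ("student_name".toList, 0),
    ("applicant_name".toList, 0), ("name_1".toList, 0),
    ("address".toList, 1), ("sender_address".toList, 1), ("my_address".toList, 1),
    ("location".toList, 1), ("residence".toList, 1),
    ("street".toList, 2),
    ("city".toList, 3), ("town".toList, 3),
    ("state".toList, 4),
    ("department".toList, 5), ("dept".toList, 5),
    ("faculty".toList, 6),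
    ("college".toList, 7), ("institution".toList, 7), ("university".toList, 7),
    ("school".toList, 7),
    ("mat_no".toList, 8), ("matric_no".toList, 8), ("reg_no".toList, 8),
    ("student_id".toList, 8), ("registration_number".toList, 8),
    ("gender".toList, 9),
    ("his_her".toList, 10), ("his_she".toList, 10),
    ("him_her".toList, 11), ("him_she".toList, 11),
    ("he_she".toList, 12), ("heshe".toList, 12),
    ("date".toList, 13), ("time".toList, 13) ]

def pvDefaults : List String :=
  [ "Joe Doe",
    "24 Avenue Avenue, Osato Junction, Benin City, Edo State",
    "24 Avenue Avenue",
    "Benin City",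
    "Edo State",
    "Production Engineering",
    "Engineering",
    "University of Benin",
    "ENG2204223",
    "Male",
    "his",
    "him",
    "he",
    "" ]

-- _LENGTHS = sorted({len(k) for k in _KEYWORDS})
def pvLens : List Nat := [4, 5, 6, 7, 8, 9, 10, 11, 12, 14, 19]

-- the double loop building the set 'found' of matched priorities
def pvFound (nl : List Char) : PySem.Set Nat :=
  (List.range nl.length).foldl
    (fun acc i =>
      pvLens.foldl
        (fun acc L =>
          match List.lookup ((nl.drop i).take L) pvKw with
          | some p => PySem.Set.add acc p
          | none => acc)
        acc)
    PySem.Set.empty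

def get_smart_placeholder_default_alt (var_name : String) : String :=
  let nl := (PySem.Str.lower var_name).toList
  match PySem.List.min? (pvFound nl) (fun x => x) with
  | some p => (pvDefaults.getD p "")   -- _DEFAULTS[min(found)]; every priority is < 14, so the index never raises
  | none => "Enter " ++ pyTitle (PySem.Str.replace var_name "_" " ")

-- ===== PRECONDITION & SPEC =====
def Spec_get_smart_placeholder_default (var_name : String) (out : String) : Prop := out = get_smart_placeholder_default_alt var_name
instance (var_name : String) (out : String) : Decidable (Spec_get_smart_placeholder_default var_name out) := by unfold Spec_get_smart_placeholder_default; infer_instance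

-- ===== CLAIM (what is proved, stated in full; the proofs are below) =====
def Claim_equal_get_smart_placeholder_default : Prop := ∀ (var_name : String), Dom_get_smart_placeholder_default var_name → Spec_get_smart_placeholder_default var_name (get_smart_placeholder_default var_name)

-- ===== LEMMAS AND PROOFS =====

-- 'priority j was matched' = some keyword of branch j occurs in nl
def OccP (j : Nat) (nl : List Char) : Prop := ∃ k, (k, j) ∈ pvKw ∧ k <:+: nl

-- a successful lookup's key/value pair is in the table (first-match assoc lookup)
theorem lookup_mem {α β : Type} [BEq α] [LawfulBEq α] (s : α) (j : β) :
    ∀ t : List (α × β), List.lookup s t = some j → (s, j) ∈ t := by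
  intro t h
  induction t with
  | nil => simp [List.lookup] at h
  | cons e rest ih =>
    rw [List.lookup_cons] at h
    by_cases hk : s == e.1
    · simp only [hk, Option.some.injEq] at h
      exact List.mem_cons.mpr (Or.inl (by obtain ⟨k, v⟩ := e; simp at hk; simp [hk, ← h]))
    · simp only [hk] at h
      exact List.mem_cons.mpr (Or.inr (ih (by simpa using h)))

-- a slice (drop then take) is an infix
theorem slice_infix {α : Type} (nl : List α) (i L : Nat) : (nl.drop i).take L <:+: nl :=
  (List.take_prefix L (nl.drop i)).isInfix.trans (List.drop_suffix i nl).isInfix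

-- membership in the inner fold over pvLens
theorem mem_inner (nl : List Char) (i : Nat) (j : Nat) :
    ∀ (Ls : List Nat) (acc : PySem.Set Nat),
      (j ∈ Ls.foldl
          (fun acc L =>
            match List.lookup ((nl.drop i).take L) pvKw with
            | some p => PySem.Set.add acc p
            | none => acc) acc)
        ↔ j ∈ acc ∨ ∃ L ∈ Ls, List.lookup ((nl.drop i).take L) pvKw = some j := by
  intro Ls
  induction Ls with
  | nil => simp
  | cons L rest ih =>
    intro acc
    simp only [List.foldl_cons, ih, List.exists_mem_cons_iff]
    cases h : List.lookup ((nl.drop i).take L) pvKw with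
    | none => simp
    | some p => simp [PySem.Set.mem_add, eq_comm]; tauto

-- membership in 'found'
theorem mem_found (nl : List Char) (j : Nat) :
    j ∈ pvFound nl ↔ ∃ i ∈ List.range nl.length, ∃ L ∈ pvLens,
      List.lookup ((nl.drop i).take L) pvKw = some j := by
  unfold pvFound
  have gen : ∀ (Is : List Nat) (acc : PySem.Set Nat),
      (j ∈ Is.foldl
          (fun acc i =>
            pvLens.foldl
              (fun acc L =>
                match List.lookup ((nl.drop i).take L) pvKw with
                | some p => PySem.Set.add acc p
                | none => acc) acc) acc)
        ↔ j ∈ acc ∨ ∃ i ∈ Is, ∃ L ∈ pvLens,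
            List.lookup ((nl.drop i).take L) pvKw = some j := by
    intro Is
    induction Is with
    | nil => simp
    | cons i0 rest ih =>
      intro acc
      simp only [List.foldl_cons, ih, mem_inner, List.exists_mem_cons_iff]
      exact or_assoc
  rw [gen]
  simp [PySem.Set.empty]

-- table facts: each keyword's length is in pvLens, it is nonempty, and it looks itself up
theorem kw_facts : ∀ e ∈ pvKw, e.1.length ∈ pvLens ∧ e.1 ≠ [] ∧ List.lookup e.1 pvKw = some e.2 := by
  decide

-- every matched priority corresponds to an occurring keyword, and conversely
theorem mem_found_iff_occ (nl : List Char) (j : Nat) : j ∈ pvFound nl ↔ OccP j nl := by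
  rw [mem_found]
  constructor
  · rintro ⟨i, _, L, _, hlk⟩
    exact ⟨_, lookup_mem _ _ _ hlk, slice_infix nl i L⟩
  · rintro ⟨k, hk, s, t, hst⟩
    have hfact : k.length ∈ pvLens ∧ k ≠ [] ∧ List.lookup k pvKw = some j := by
      have := kw_facts (k, j) hk; simpa using this
    refine ⟨s.length, ?_, k.length, hfact.1, ?_⟩
    · rw [List.mem_range, ← hst]
      have : 0 < k.length := List.length_pos_iff.mpr hfact.2.1
      simp [List.length_append]
      omega
    · have hdrop : nl.drop s.length = k ++ t := by
        rw [← hst, List.append_assoc, List.drop_left]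
      rw [hdrop, List.take_left]
      exact hfact.2.2

-- every priority in the table is < 14
theorem occ_lt (j : Nat) (nl : List Char) (h : OccP j nl) : j < 14 := by
  rcases h with ⟨k, hk, _⟩
  have : ∀ p : List Char × Nat, p ∈ pvKw → p.2 < 14 := by decide
  exact this (k, j) hk

-- the 14 branch conditions of A, characterized through OccP
theorem cond0_iff (s : String) :
    (["name", "full_name", "student_name", "applicant_name", "name_1"].any
        (fun x => PySem.Str.isIn x s)) = true ↔ OccP 0 s.toList := by
  simp [OccP, pvKw, PySem.Chars.isIn_iff_infix]

theorem cond1_iff (s : String) :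
    (["address", "sender_address", "my_address", "location", "residence"].any
        (fun x => PySem.Str.isIn x s)) = true ↔ OccP 1 s.toList := by
  simp [OccP, pvKw, PySem.Chars.isIn_iff_infix]

theorem cond2_iff (s : String) :
    PySem.Str.isIn "street" s = true ↔ OccP 2 s.toList := by
  simp [OccP, pvKw, PySem.Chars.isIn_iff_infix]

theorem cond3_iff (s : String) :
    (["city", "town"].any (fun x => PySem.Str.isIn x s)) = true ↔ OccP 3 s.toList := by
  simp [OccP, pvKw, PySem.Chars.isIn_iff_infix]

theorem cond4_iff (s : String) :
    PySem.Str.isIn "state" s = true ↔ OccP 4 s.toList := by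
  simp [OccP, pvKw, PySem.Chars.isIn_iff_infix]

theorem cond5_iff (s : String) :
    (["department", "dept"].any (fun x => PySem.Str.isIn x s)) = true ↔ OccP 5 s.toList := by
  simp [OccP, pvKw, PySem.Chars.isIn_iff_infix]

theorem cond6_iff (s : String) :
    (["faculty"].any (fun x => PySem.Str.isIn x s)) = true ↔ OccP 6 s.toList := by
  simp [OccP, pvKw, PySem.Chars.isIn_iff_infix]

theorem cond7_iff (s : String) :
    (["college", "institution", "university", "school"].any
        (fun x => PySem.Str.isIn x s)) = true ↔ OccP 7 s.toList := by
  simp [OccP, pvKw, PySem.Chars.isIn_iff_infix]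

theorem cond8_iff (s : String) :
    (["mat_no", "matric_no", "reg_no", "student_id", "registration_number"].any
        (fun x => PySem.Str.isIn x s)) = true ↔ OccP 8 s.toList := by
  simp [OccP, pvKw, PySem.Chars.isIn_iff_infix]

theorem cond9_iff (s : String) :
    PySem.Str.isIn "gender" s = true ↔ OccP 9 s.toList := by
  simp [OccP, pvKw, PySem.Chars.isIn_iff_infix]

theorem cond10_iff (s : String) :
    (["his_her", "his_she"].any (fun x => PySem.Str.isIn x s)) = true ↔ OccP 10 s.toList := by
  simp [OccP, pvKw, PySem.Chars.isIn_iff_infix]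

theorem cond11_iff (s : String) :
    (["him_her", "him_she"].any (fun x => PySem.Str.isIn x s)) = true ↔ OccP 11 s.toList := by
  simp [OccP, pvKw, PySem.Chars.isIn_iff_infix]

theorem cond12_iff (s : String) :
    (["he_she", "heshe"].any (fun x => PySem.Str.isIn x s)) = true ↔ OccP 12 s.toList := by
  simp [OccP, pvKw, PySem.Chars.isIn_iff_infix]

theorem cond13_iff (s : String) :
    (["date", "time"].any (fun x => PySem.Str.isIn x s)) = true ↔ OccP 13 s.toList := by
  simp [OccP, pvKw, PySem.Chars.isIn_iff_infix]

-- ===== VERDICT (by name: the statement is the Claim_ definition above) =====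
theorem get_smart_placeholder_default_spec : Claim_equal_get_smart_placeholder_default := by
  intro var_name _
  unfold Spec_get_smart_placeholder_default get_smart_placeholder_default get_smart_placeholder_default_alt
  dsimp only
  cases hmin : PySem.List.min? (pvFound ((PySem.Str.lower var_name).toList)) (fun x => x) with
  | none =>
    have hemp : pvFound ((PySem.Str.lower var_name).toList) = [] :=
      (PySem.List.min?_eq_none_iff _ _).mp hmin
    have hocc : ∀ j, ¬ OccP j ((PySem.Str.lower var_name).toList) := by
      intro j h
      have hm := (mem_found_iff_occ _ j).mpr h
      rw [hemp] at hm
      cases hm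
    rw [if_neg (fun hc => hocc 0 ((cond0_iff _).mp hc)),
        if_neg (fun hc => hocc 1 ((cond1_iff _).mp hc)),
        if_neg (fun hc => hocc 2 ((cond2_iff _).mp hc)),
        if_neg (fun hc => hocc 3 ((cond3_iff _).mp hc)),
        if_neg (fun hc => hocc 4 ((cond4_iff _).mp hc)),
        if_neg (fun hc => hocc 5 ((cond5_iff _).mp hc)),
        if_neg (fun hc => hocc 6 ((cond6_iff _).mp hc)),
        if_neg (fun hc => hocc 7 ((cond7_iff _).mp hc)),
        if_neg (fun hc => hocc 8 ((cond8_iff _).mp hc)),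
        if_neg (fun hc => hocc 9 ((cond9_iff _).mp hc)),
        if_neg (fun hc => hocc 10 ((cond10_iff _).mp hc)),
        if_neg (fun hc => hocc 11 ((cond11_iff _).mp hc)),
        if_neg (fun hc => hocc 12 ((cond12_iff _).mp hc)),
        if_neg (fun hc => hocc 13 ((cond13_iff _).mp hc))]
  | some p =>
    have hpmem : p ∈ pvFound ((PySem.Str.lower var_name).toList) := PySem.List.min?_mem hmin
    have hpOcc : OccP p ((PySem.Str.lower var_name).toList) := (mem_found_iff_occ _ _).mp hpmem
    have hmono := PySem.List.min?_isMin hmin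
    have hlt : ∀ q, q < p → ¬ OccP q ((PySem.Str.lower var_name).toList) := by
      intro q hq hOq
      have := hmono q ((mem_found_iff_occ _ _).mpr hOq)
      omega
    have hp14 : p < 14 := occ_lt p _ hpOcc
    interval_cases p
    · rw [if_pos ((cond0_iff _).mpr hpOcc)]
      rfl
    · rw [if_neg (fun hc => hlt 0 (by omega) ((cond0_iff _).mp hc)),
          if_pos ((cond1_iff _).mpr hpOcc)]
      rfl
    · rw [if_neg (fun hc => hlt 0 (by omega) ((cond0_iff _).mp hc)),
          if_neg (fun hc => hlt 1 (by omega) ((cond1_iff _).mp hc)),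
          if_pos ((cond2_iff _).mpr hpOcc)]
      rfl
    · rw [if_neg (fun hc => hlt 0 (by omega) ((cond0_iff _).mp hc)),
          if_neg (fun hc => hlt 1 (by omega) ((cond1_iff _).mp hc)),
          if_neg (fun hc => hlt 2 (by omega) ((cond2_iff _).mp hc)),
          if_pos ((cond3_iff _).mpr hpOcc)]
      rfl
    · rw [if_neg (fun hc => hlt 0 (by omega) ((cond0_iff _).mp hc)),
          if_neg (fun hc => hlt 1 (by omega) ((cond1_iff _).mp hc)),
          if_neg (fun hc => hlt 2 (by omega) ((cond2_iff _).mp hc)),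
          if_neg (fun hc => hlt 3 (by omega) ((cond3_iff _).mp hc)),
          if_pos ((cond4_iff _).mpr hpOcc)]
      rfl
    · rw [if_neg (fun hc => hlt 0 (by omega) ((cond0_iff _).mp hc)),
          if_neg (fun hc => hlt 1 (by omega) ((cond1_iff _).mp hc)),
          if_neg (fun hc => hlt 2 (by omega) ((cond2_iff _).mp hc)),
          if_neg (fun hc => hlt 3 (by omega) ((cond3_iff _).mp hc)),
          if_neg (fun hc => hlt 4 (by omega) ((cond4_iff _).mp hc)),
          if_pos ((cond5_iff _).mpr hpOcc)]
      rfl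
    · rw [if_neg (fun hc => hlt 0 (by omega) ((cond0_iff _).mp hc)),
          if_neg (fun hc => hlt 1 (by omega) ((cond1_iff _).mp hc)),
          if_neg (fun hc => hlt 2 (by omega) ((cond2_iff _).mp hc)),
          if_neg (fun hc => hlt 3 (by omega) ((cond3_iff _).mp hc)),
          if_neg (fun hc => hlt 4 (by omega) ((cond4_iff _).mp hc)),
          if_neg (fun hc => hlt 5 (by omega) ((cond5_iff _).mp hc)),
          if_pos ((cond6_iff _).mpr hpOcc)]
      rfl
    · rw [if_neg (fun hc => hlt 0 (by omega) ((cond0_iff _).mp hc)),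
          if_neg (fun hc => hlt 1 (by omega) ((cond1_iff _).mp hc)),
          if_neg (fun hc => hlt 2 (by omega) ((cond2_iff _).mp hc)),
          if_neg (fun hc => hlt 3 (by omega) ((cond3_iff _).mp hc)),
          if_neg (fun hc => hlt 4 (by omega) ((cond4_iff _).mp hc)),
          if_neg (fun hc => hlt 5 (by omega) ((cond5_iff _).mp hc)),
          if_neg (fun hc => hlt 6 (by omega) ((cond6_iff _).mp hc)),
          if_pos ((cond7_iff _).mpr hpOcc)]
      rfl
    · rw [if_neg (fun hc => hlt 0 (by omega) ((cond0_iff _).mp hc)),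
          if_neg (fun hc => hlt 1 (by omega) ((cond1_iff _).mp hc)),
          if_neg (fun hc => hlt 2 (by omega) ((cond2_iff _).mp hc)),
          if_neg (fun hc => hlt 3 (by omega) ((cond3_iff _).mp hc)),
          if_neg (fun hc => hlt 4 (by omega) ((cond4_iff _).mp hc)),
          if_neg (fun hc => hlt 5 (by omega) ((cond5_iff _).mp hc)),
          if_neg (fun hc => hlt 6 (by omega) ((cond6_iff _).mp hc)),
          if_neg (fun hc => hlt 7 (by omega) ((cond7_iff _).mp hc)),
          if_pos ((cond8_iff _).mpr hpOcc)]
      rfl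
    · rw [if_neg (fun hc => hlt 0 (by omega) ((cond0_iff _).mp hc)),
          if_neg (fun hc => hlt 1 (by omega) ((cond1_iff _).mp hc)),
          if_neg (fun hc => hlt 2 (by omega) ((cond2_iff _).mp hc)),
          if_neg (fun hc => hlt 3 (by omega) ((cond3_iff _).mp hc)),
          if_neg (fun hc => hlt 4 (by omega) ((cond4_iff _).mp hc)),
          if_neg (fun hc => hlt 5 (by omega) ((cond5_iff _).mp hc)),
          if_neg (fun hc => hlt 6 (by omega) ((cond6_iff _).mp hc)),
          if_neg (fun hc => hlt 7 (by omega) ((cond7_iff _).mp hc)),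
          if_neg (fun hc => hlt 8 (by omega) ((cond8_iff _).mp hc)),
          if_pos ((cond9_iff _).mpr hpOcc)]
      rfl
    · rw [if_neg (fun hc => hlt 0 (by omega) ((cond0_iff _).mp hc)),
          if_neg (fun hc => hlt 1 (by omega) ((cond1_iff _).mp hc)),
          if_neg (fun hc => hlt 2 (by omega) ((cond2_iff _).mp hc)),
          if_neg (fun hc => hlt 3 (by omega) ((cond3_iff _).mp hc)),
          if_neg (fun hc => hlt 4 (by omega) ((cond4_iff _).mp hc)),
          if_neg (fun hc => hlt 5 (by omega) ((cond5_iff _).mp hc)),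
          if_neg (fun hc => hlt 6 (by omega) ((cond6_iff _).mp hc)),
          if_neg (fun hc => hlt 7 (by omega) ((cond7_iff _).mp hc)),
          if_neg (fun hc => hlt 8 (by omega) ((cond8_iff _).mp hc)),
          if_neg (fun hc => hlt 9 (by omega) ((cond9_iff _).mp hc)),
          if_pos ((cond10_iff _).mpr hpOcc)]
      rfl
    · rw [if_neg (fun hc => hlt 0 (by omega) ((cond0_iff _).mp hc)),
          if_neg (fun hc => hlt 1 (by omega) ((cond1_iff _).mp hc)),
          if_neg (fun hc => hlt 2 (by omega) ((cond2_iff _).mp hc)),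
          if_neg (fun hc => hlt 3 (by omega) ((cond3_iff _).mp hc)),
          if_neg (fun hc => hlt 4 (by omega) ((cond4_iff _).mp hc)),
          if_neg (fun hc => hlt 5 (by omega) ((cond5_iff _).mp hc)),
          if_neg (fun hc => hlt 6 (by omega) ((cond6_iff _).mp hc)),
          if_neg (fun hc => hlt 7 (by omega) ((cond7_iff _).mp hc)),
          if_neg (fun hc => hlt 8 (by omega) ((cond8_iff _).mp hc)),
          if_neg (fun hc => hlt 9 (by omega) ((cond9_iff _).mp hc)),
          if_neg (fun hc => hlt 10 (by omega) ((cond10_iff _).mp hc)),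
          if_pos ((cond11_iff _).mpr hpOcc)]
      rfl
    · rw [if_neg (fun hc => hlt 0 (by omega) ((cond0_iff _).mp hc)),
          if_neg (fun hc => hlt 1 (by omega) ((cond1_iff _).mp hc)),
          if_neg (fun hc => hlt 2 (by omega) ((cond2_iff _).mp hc)),
          if_neg (fun hc => hlt 3 (by omega) ((cond3_iff _).mp hc)),
          if_neg (fun hc => hlt 4 (by omega) ((cond4_iff _).mp hc)),
          if_neg (fun hc => hlt 5 (by omega) ((cond5_iff _).mp hc)),
          if_neg (fun hc => hlt 6 (by omega) ((cond6_iff _).mp hc)),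
          if_neg (fun hc => hlt 7 (by omega) ((cond7_iff _).mp hc)),
          if_neg (fun hc => hlt 8 (by omega) ((cond8_iff _).mp hc)),
          if_neg (fun hc => hlt 9 (by omega) ((cond9_iff _).mp hc)),
          if_neg (fun hc => hlt 10 (by omega) ((cond10_iff _).mp hc)),
          if_neg (fun hc => hlt 11 (by omega) ((cond11_iff _).mp hc)),
          if_pos ((cond12_iff _).mpr hpOcc)]
      rfl
    · rw [if_neg (fun hc => hlt 0 (by omega) ((cond0_iff _).mp hc)),
          if_neg (fun hc => hlt 1 (by omega) ((cond1_iff _).mp hc)),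
          if_neg (fun hc => hlt 2 (by omega) ((cond2_iff _).mp hc)),
          if_neg (fun hc => hlt 3 (by omega) ((cond3_iff _).mp hc)),
          if_neg (fun hc => hlt 4 (by omega) ((cond4_iff _).mp hc)),
          if_neg (fun hc => hlt 5 (by omega) ((cond5_iff _).mp hc)),
          if_neg (fun hc => hlt 6 (by omega) ((cond6_iff _).mp hc)),
          if_neg (fun hc => hlt 7 (by omega) ((cond7_iff _).mp hc)),
          if_neg (fun hc => hlt 8 (by omega) ((cond8_iff _).mp hc)),
          if_neg (fun hc => hlt 9 (by omega) ((cond9_iff _).mp hc)),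
          if_neg (fun hc => hlt 10 (by omega) ((cond10_iff _).mp hc)),
          if_neg (fun hc => hlt 11 (by omega) ((cond11_iff _).mp hc)),
          if_neg (fun hc => hlt 12 (by omega) ((cond12_iff _).mp hc)),
          if_pos ((cond13_iff _).mpr hpOcc)]
      rfl
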